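-- pv_equiv track=rewrite | github.com/origin1508/algorithm | 프로그래머스/unrated/161989. 덧칠하기/덧칠하기.py | solution
-- ===== SOURCE A (Python) =====
-- def solution(n, m, section):
--     answer = 0
--     brush = 0
--     while section:
--         wall = section.pop(0)
--         if wall > brush:
--             brush = wall + m - 1
--             answer += 1
--
--     return answer
-- ===== SOURCE B (Python) =====
-- def solution(n, m, section):
--     # Two-pointer grouping greedy: one outer iteration per stroke, an inner
--     # loop skipping every section already covered. Leaves `section` intact
--     # (A empties it via pop(0); equivalence is about the return value).
--     answer = 0
--     i = 0
--     covered = 0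
--     total = len(section)
--     while True:
--         while i < total and section[i] <= covered:
--             i += 1
--         if i == total:
--             return answer
--         answer += 1
--         covered = section[i] + m - 1
--         i += 1
-- ===== Notes on version B (the rewrite author's own statement) =====
-- stated objective: alternative
-- what changed: Replaces the destructive pop(0)-and-flag scan (quadratic from pop(0)) with a non-mutating O(n) two-pointer grouping greedy: one outer iteration per brush stroke and an inner loop that skips every section the current stroke already covers.
import Mathlib
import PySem

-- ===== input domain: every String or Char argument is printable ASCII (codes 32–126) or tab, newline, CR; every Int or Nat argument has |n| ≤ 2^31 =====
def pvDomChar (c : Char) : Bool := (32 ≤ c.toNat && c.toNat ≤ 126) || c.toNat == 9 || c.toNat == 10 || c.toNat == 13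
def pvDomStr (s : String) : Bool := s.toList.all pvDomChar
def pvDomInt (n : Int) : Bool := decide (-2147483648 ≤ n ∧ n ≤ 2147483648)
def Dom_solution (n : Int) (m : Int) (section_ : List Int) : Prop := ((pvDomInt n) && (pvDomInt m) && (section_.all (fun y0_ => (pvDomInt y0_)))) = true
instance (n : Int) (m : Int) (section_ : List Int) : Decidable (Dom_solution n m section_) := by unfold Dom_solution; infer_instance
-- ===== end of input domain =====

-- B replaces A's destructive pop(0)-and-flag scan by a non-mutating two-pointer
-- grouping greedy (one outer step per stroke, an inner skip loop); the theorem
-- is about the RETURN value only — A empties its `section` argument, B does not.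

-- ===== PORT A =====
-- `while section: wall = section.pop(0); if wall > brush: brush = wall+m-1; answer += 1`
def solutionLoopA (m : Int) : List Int → Int → Int → Int
  | [], answer, _ => answer
  | wall :: rest, answer, brush =>
    if wall > brush then solutionLoopA m rest (answer + 1) (wall + m - 1)
    else solutionLoopA m rest answer brush

def solution (n : Int) (m : Int) (section_ : List Int) : Int :=
  solutionLoopA m section_ 0 0

-- ===== PORT B =====
-- inner `while i < total and section[i] <= covered: i += 1` (returns the remaining suffix)
def skipCovered (covered : Int) : List Int → List Int
  | [] => []
  | x :: rest => if x ≤ covered then skipCovered covered rest else x :: rest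

theorem skipCovered_length_le (covered : Int) (s : List Int) :
    (skipCovered covered s).length ≤ s.length := by
  induction s with
  | nil => simp [skipCovered]
  | cons x rest ih =>
    simp only [skipCovered]
    split
    · exact Nat.le_succ_of_le ih
    · simp

-- outer `while True:` — one iteration per stroke
def strokesB (m : Int) (s : List Int) (answer covered : Int) : Int :=
  match h : skipCovered covered s with
  | [] => answer
  | x :: rest => strokesB m rest (answer + 1) (x + m - 1)
termination_by s.length
decreasing_by
  have := skipCovered_length_le covered s
  rw [h] at this
  simpa using Nat.lt_of_lt_of_le (Nat.lt_succ_self _) this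

def solution_alt (n : Int) (m : Int) (section_ : List Int) : Int :=
  strokesB m section_ 0 0

-- ===== PRECONDITION & SPEC =====
def Spec_solution (n : Int) (m : Int) (section_ : List Int) (out : Int) : Prop := out = solution_alt n m section_
instance (n : Int) (m : Int) (section_ : List Int) (out : Int) : Decidable (Spec_solution n m section_ out) := by unfold Spec_solution; infer_instance

-- ===== CLAIM (what is proved, stated in full; the proofs are below) =====
def Claim_equal_solution : Prop := ∀ (n : Int) (m : Int) (section_ : List Int), Dom_solution n m section_ → Spec_solution n m section_ (solution n m section_)

-- ===== LEMMAS AND PROOFS =====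
theorem loopA_eq_strokesB (m : Int) (s : List Int) (answer covered : Int) :
    solutionLoopA m s answer covered = strokesB m s answer covered := by
  induction s generalizing answer covered with
  | nil => simp [solutionLoopA, strokesB, skipCovered]
  | cons x rest ih =>
    by_cases hx : x ≤ covered
    · have hskip : skipCovered covered (x :: rest) = skipCovered covered rest := by
        simp [skipCovered, hx]
      have : strokesB m (x :: rest) answer covered = strokesB m rest answer covered := by
        rw [strokesB, strokesB, hskip]
      rw [this, ← ih]
      simp [solutionLoopA, not_lt.mpr hx]
    · have hskip : skipCovered covered (x :: rest) = x :: rest := by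
        simp [skipCovered, hx]
      have : strokesB m (x :: rest) answer covered
          = strokesB m rest (answer + 1) (x + m - 1) := by
        rw [strokesB, hskip]
      rw [this, ← ih]
      have hx' : covered < x := not_le.mp hx
      simp [solutionLoopA, hx']

-- ===== VERDICT (by name: the statement is the Claim_ definition above) =====
theorem solution_spec : Claim_equal_solution := by
  intro n m s _
  unfold Spec_solution solution solution_alt
  exact loopA_eq_strokesB m s 0 0
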